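-- pv_equiv track=rewrite | github.com/crasherbe/togel-predictor-web | app.py | analyze_delay
-- ===== SOURCE A (Python) =====
-- def analyze_delay(history):
--     """Hitung delay tiap angka"""
--     last_pos = {}
--     delay_count = {}
--     for i, result in enumerate(history[::-1]):  # mulai dari result terbaru
--         for d in result:
--             if d not in last_pos:
--                 last_pos[d] = i
--                 delay_count[d] = i + 1
--     return delay_count
-- ===== SOURCE B (Python) =====
-- def analyze_delay(history):
--     """Hitung delay tiap angka"""
--     delay_count = {}
--     for result in history:  # oldest first: age every existing delay, newest occurrences reset to 1
--         new = {}
--         for d in result: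
--             new.setdefault(d, 1)
--         for d, v in delay_count.items():
--             if d not in new:
--                 new[d] = v + 1
--         delay_count = new
--     return delay_count
-- ===== Notes on version B (the rewrite author's own statement) =====
-- stated objective: alternative
-- what changed: A walks the reversed history with an enumerate index and two parallel dicts (last_pos plus delay_count), inserting only digits not seen yet; B drops the index and the last_pos dict entirely and makes one forward pass that each round builds a fresh dict with the current result's digits at delay 1 and every surviving previous delay aged by +1 (trading per-round dict rebuilding for the simpler state).
import Mathlib
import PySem

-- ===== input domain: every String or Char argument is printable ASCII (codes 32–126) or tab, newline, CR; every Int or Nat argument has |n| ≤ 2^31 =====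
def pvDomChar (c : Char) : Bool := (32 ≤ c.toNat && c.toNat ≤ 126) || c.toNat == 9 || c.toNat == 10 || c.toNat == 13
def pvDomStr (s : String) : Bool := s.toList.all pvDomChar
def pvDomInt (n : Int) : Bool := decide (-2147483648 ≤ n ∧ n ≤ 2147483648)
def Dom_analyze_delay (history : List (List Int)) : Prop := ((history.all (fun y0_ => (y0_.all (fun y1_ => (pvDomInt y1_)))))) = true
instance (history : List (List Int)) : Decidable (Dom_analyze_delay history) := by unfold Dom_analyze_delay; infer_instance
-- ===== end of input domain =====

-- B replaces A's reverse enumeration with its index-carrying last_pos/delay_count dict pair by a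
-- single forward pass that rebuilds one dict per round: digits just drawn get delay 1 and every
-- surviving previous delay ages by +1 (objective: alternative; it trades per-round dict rebuilding
-- for dropping the index and the last_pos dict).

-- ===== PORT A =====
def analyze_delay (history : List (List Int)) : List (Int × Int) :=
  let rev := (PySem.List.slice? history none none (-1)).getD []
  let st := (PySem.List.enumerate rev 0).foldl
    (fun (st : PySem.Dict Int Int × PySem.Dict Int Int) p =>
      p.2.foldl (fun st d =>
        if st.1.contains d then st
        else (st.1.insert d p.1, st.2.insert d (p.1 + 1))) st)
    (PySem.Dict.empty, PySem.Dict.empty)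
  st.2.items

-- ===== PORT B =====
def analyze_delay_alt (history : List (List Int)) : List (Int × Int) :=
  (history.foldl
    (fun (delay_count : PySem.Dict Int Int) result =>
      let new := result.foldl (fun (n : PySem.Dict Int Int) d => n.setdefault d 1) PySem.Dict.empty
      delay_count.items.foldl
        (fun n p => if n.contains p.1 then n else n.insert p.1 (p.2 + 1)) new)
    PySem.Dict.empty).items

-- ===== PRECONDITION & SPEC =====
def Spec_analyze_delay (history : List (List Int)) (out : List (Int × Int)) : Prop := out = analyze_delay_alt history
instance (history : List (List Int)) (out : List (Int × Int)) : Decidable (Spec_analyze_delay history out) := by unfold Spec_analyze_delay; infer_instance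

-- ===== CLAIM (what is proved, stated in full; the proofs are below) =====
def Claim_equal_analyze_delay : Prop := ∀ (history : List (List Int)), Dom_analyze_delay history → Spec_analyze_delay history (analyze_delay history)

-- ===== LEMMAS AND PROOFS =====

-- distinct elements of r, in first-occurrence order, skipping those already in `seen`
def news (seen : List Int) : List Int → List Int
  | [] => []
  | d :: r => if d ∈ seen then news seen r else d :: news (d :: seen) r

theorem news_congr (r : List Int) : ∀ (s t : List Int), (∀ x, x ∈ s ↔ x ∈ t) → news s r = news t r := by
  induction r with
  | nil => intro s t _; rfl
  | cons d r ih =>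
    intro s t h
    simp only [news]
    by_cases hd : d ∈ s
    · rw [if_pos hd, if_pos ((h d).mp hd)]; exact ih s t h
    · rw [if_neg hd, if_neg (fun hc => hd ((h d).mpr hc))]
      exact congrArg (d :: ·) (ih _ _ (fun x => by simp [h x]))

theorem mem_news (r : List Int) : ∀ (seen : List Int) (x : Int), x ∈ news seen r ↔ x ∈ r ∧ x ∉ seen := by
  induction r with
  | nil => simp [news]
  | cons d r ih =>
    intro seen x
    simp only [news]
    by_cases hd : d ∈ seen
    · rw [if_pos hd, ih]
      constructor
      · rintro ⟨hx, hns⟩; exact ⟨List.mem_cons_of_mem _ hx, hns⟩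
      · rintro ⟨hx, hns⟩
        rcases List.mem_cons.mp hx with rfl | hx
        · exact absurd hd hns
        · exact ⟨hx, hns⟩
    · rw [if_neg hd]
      simp only [List.mem_cons, ih]
      constructor
      · rintro (rfl | ⟨hx, hns⟩)
        · exact ⟨Or.inl rfl, hd⟩
        · exact ⟨Or.inr hx, fun h => hns (Or.inr h)⟩
      · rintro ⟨rfl | hx, hns⟩
        · exact Or.inl rfl
        · by_cases hxd : x = d
          · exact Or.inl hxd
          · exact Or.inr ⟨hx, fun h => h.elim hxd hns⟩

theorem nodup_news (r : List Int) : ∀ (seen : List Int), (news seen r).Nodup := by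
  induction r with
  | nil => intro _; simp [news]
  | cons d r ih =>
    intro seen
    simp only [news]
    by_cases hd : d ∈ seen
    · rw [if_pos hd]; exact ih seen
    · rw [if_neg hd]
      refine List.nodup_cons.mpr ⟨fun hmem => ?_, ih _⟩
      exact ((mem_news r _ d).mp hmem).2 (List.mem_cons_self)

theorem news_append (r : List Int) : ∀ (s t : List Int),
    news (s ++ t) r = (news t r).filter (fun d => decide (d ∉ s)) := by
  induction r with
  | nil => intro s t; rfl
  | cons d r ih =>
    intro s t
    simp only [news]
    by_cases hs : d ∈ s
    · rw [if_pos (List.mem_append.mpr (Or.inl hs))]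
      by_cases ht : d ∈ t
      · rw [if_pos ht]; exact ih s t
      · rw [if_neg ht]
        simp only [List.filter_cons, decide_eq_true_eq]
        rw [if_neg (by simp [hs])]
        have hmem : ∀ x, x ∈ s ++ t ↔ x ∈ s ++ d :: t := by
          intro x
          simp only [List.mem_append, List.mem_cons]
          constructor
          · rintro (h | h)
            · exact Or.inl h
            · exact Or.inr (Or.inr h)
          · rintro (h | rfl | h)
            · exact Or.inl h
            · exact Or.inl hs
            · exact Or.inr h
        rw [news_congr r (s ++ t) (s ++ d :: t) hmem]
        exact ih s (d :: t)
    · by_cases ht : d ∈ t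
      · rw [if_pos (List.mem_append.mpr (Or.inr ht)), if_pos ht]
        exact ih s t
      · rw [if_neg (by simp [hs, ht]), if_neg ht]
        simp only [List.filter_cons, decide_eq_true_eq]
        rw [if_pos (by simp [hs])]
        rw [news_congr r (d :: (s ++ t)) (s ++ d :: t) (fun x => by simp only [List.mem_append, List.mem_cons]; tauto)]
        exact congrArg (d :: ·) (ih s (d :: t))

theorem news_eq_filter (r seen : List Int) :
    news seen r = (news [] r).filter (fun d => decide (d ∉ seen)) := by
  have := news_append r seen []
  simpa using this

-- the inner loop of A over one result
theorem innerA (r : List Int) (i : Int) : ∀ (lp dc : PySem.Dict Int Int), dc.keys = lp.keys →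
    ((r.foldl (fun st d =>
        if st.1.contains d then st
        else (st.1.insert d i, st.2.insert d (i + 1))) ((lp, dc) : PySem.Dict Int Int × PySem.Dict Int Int)).1.keys
        = lp.keys ++ news lp.keys r)
    ∧ ((r.foldl (fun st d =>
        if st.1.contains d then st
        else (st.1.insert d i, st.2.insert d (i + 1))) ((lp, dc) : PySem.Dict Int Int × PySem.Dict Int Int)).2.items
        = dc.items ++ (news lp.keys r).map (fun d => (d, i + 1))) := by
  induction r with
  | nil => intro lp dc _; simp [news]
  | cons d r ih =>
    intro lp dc hk
    simp only [List.foldl_cons]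
    by_cases hd : d ∈ lp.keys
    · rw [if_pos (by rw [PySem.Dict.contains_eq_decide_mem_keys]; simpa using hd)]
      have h := ih lp dc hk
      simp only [news, if_pos hd]
      exact h
    · rw [if_neg (by rw [PySem.Dict.contains_eq_decide_mem_keys]; simpa using hd)]
      have hlpc : lp.contains d = false := by
        rw [PySem.Dict.contains_eq_decide_mem_keys]; simpa using hd
      have hdcc : dc.contains d = false := by
        rw [PySem.Dict.contains_eq_decide_mem_keys, hk]; simpa using hd
      have hkeys : (lp.insert d i).keys = lp.keys ++ [d] :=
        PySem.Dict.keys_insert_of_not_contains _ _ hlpc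
      have hitems : (dc.insert d (i + 1)).items = dc.items ++ [(d, i + 1)] :=
        PySem.Dict.items_insert_of_not_contains _ _ hdcc
      have hk' : (dc.insert d (i + 1)).keys = (lp.insert d i).keys := by
        show (dc.insert d (i+1)).items.map Prod.fst = _
        rw [hitems, hkeys, List.map_append]
        show dc.keys ++ _ = _
        rw [hk]; rfl
      have h := ih (lp.insert d i) (dc.insert d (i + 1)) hk'
      rcases h with ⟨h1, h2⟩
      have hcongr : news (lp.keys ++ [d]) r = news (d :: lp.keys) r := by
        apply news_congr; intro x; simp; tauto
      constructor
      · rw [h1, hkeys, hcongr]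
        simp only [news, if_neg hd, List.append_assoc, List.cons_append, List.nil_append]
      · rw [h2, hitems, hkeys, hcongr]
        simp only [news, if_neg hd, List.map_cons, List.append_assoc, List.cons_append,
          List.nil_append]

-- the first inner loop of B (dict.setdefault over a result)
theorem dedup1_items : ∀ (r : List Int) (n : PySem.Dict Int Int),
    (r.foldl (fun (n : PySem.Dict Int Int) d => n.setdefault d 1) n).items
      = n.items ++ (news n.keys r).map (fun d => (d, (1 : Int))) := by
  intro r
  induction r with
  | nil => intro n; simp [news]
  | cons d r ih =>
    intro n
    simp only [List.foldl_cons]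
    by_cases hd : d ∈ n.keys
    · rw [PySem.Dict.setdefault_of_contains _ _ (by rw [PySem.Dict.contains_eq_decide_mem_keys]; exact decide_eq_true hd)]
      simp only [news, if_pos hd]
      exact ih n
    · have hnc : n.contains d = false := by
        rw [PySem.Dict.contains_eq_decide_mem_keys]; simpa using hd
      rw [PySem.Dict.setdefault_of_not_contains _ _ hnc]
      have hitems : (n.insert d 1).items = n.items ++ [(d, (1:Int))] :=
        PySem.Dict.items_insert_of_not_contains _ _ hnc
      have hkeys : (n.insert d 1).keys = n.keys ++ [d] :=
        PySem.Dict.keys_insert_of_not_contains _ _ hnc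
      rw [ih, hitems, hkeys]
      rw [news_congr r (n.keys ++ [d]) (d :: n.keys) (fun x => by simp; tauto)]
      simp [news, if_neg hd]

-- the second inner loop of B (merge the aged previous delays)
theorem mergeB : ∀ (ps : List (Int × Int)) (n : PySem.Dict Int Int), (ps.map Prod.fst).Nodup →
    (ps.foldl (fun (n : PySem.Dict Int Int) p =>
        if n.contains p.1 then n else n.insert p.1 (p.2 + 1)) n).items
      = n.items ++ (ps.filter (fun p => !(n.contains p.1))).map (fun p => (p.1, p.2 + 1)) := by
  intro ps
  induction ps with
  | nil => intro n _; simp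
  | cons p ps ih =>
    intro n hnd
    simp only [List.map_cons, List.nodup_cons] at hnd
    simp only [List.foldl_cons, List.filter_cons]
    by_cases hc : n.contains p.1
    · rw [if_pos hc]
      have hb : (!(n.contains p.1)) = false := by rw [hc]; rfl
      rw [hb]
      simp only [Bool.false_eq_true, if_false]
      exact ih n hnd.2
    · rw [if_neg hc, if_pos (by simp [hc])]
      have hcf : n.contains p.1 = false := by simpa using hc
      have hitems := PySem.Dict.items_insert_of_not_contains n (p.2 + 1) hcf
      rw [ih _ hnd.2, hitems]
      have hfc : ps.filter (fun q => !((n.insert p.1 (p.2 + 1)).contains q.1))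
          = ps.filter (fun q => !(n.contains q.1)) := by
        apply List.filter_congr
        intro q hq
        have hne : q.1 ≠ p.1 := fun h => hnd.1 (h ▸ List.mem_map_of_mem hq)
        rw [PySem.Dict.contains_insert]
        simp [hne]
      rw [hfc]
      simp [List.append_assoc]

-- the canonical one-step-per-result recursion both ports compute
def Cfun : List (List Int) → PySem.Dict Int Int
  | [] => PySem.Dict.empty
  | r :: L => (Cfun L).items.foldl
      (fun n p => if n.contains p.1 then n else n.insert p.1 (p.2 + 1))
      (r.foldl (fun (n : PySem.Dict Int Int) d => n.setdefault d 1) PySem.Dict.empty)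

theorem map_fst_filter_contains (m : PySem.Dict Int Int) : ∀ (l : List (Int × Int)),
    (l.filter (fun p => !(m.contains p.1))).map Prod.fst
      = (l.map Prod.fst).filter (fun x => !(m.contains x)) := by
  intro l
  induction l with
  | nil => rfl
  | cons p l ih =>
    simp only [List.filter_cons, List.map_cons]
    by_cases h : (!(m.contains p.1)) = true
    · simp only [h, List.map_cons, ih, if_pos trivial]
    · rw [if_neg (by simp_all), if_neg (by simp_all)]
      exact ih

theorem dedup1_empty_items (r : List Int) :
    (r.foldl (fun (n : PySem.Dict Int Int) d => n.setdefault d 1) PySem.Dict.empty).items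
      = (news [] r).map (fun d => (d, (1 : Int))) := by
  rw [dedup1_items]
  simp [PySem.Dict.empty]

theorem dedup1_keys (r : List Int) :
    (r.foldl (fun (n : PySem.Dict Int Int) d => n.setdefault d 1) PySem.Dict.empty).keys
      = news [] r := by
  show (r.foldl (fun (n : PySem.Dict Int Int) d => n.setdefault d 1) PySem.Dict.empty).items.map Prod.fst = _
  rw [dedup1_empty_items, List.map_map]
  have e1 : (Prod.fst ∘ fun d => ((d : Int), (1 : Int))) = id := by funext d; rfl
  rw [e1, List.map_id]

theorem Cfun_nodup_keys : ∀ (L : List (List Int)), (Cfun L).keys.Nodup := by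
  intro L
  induction L with
  | nil => simp [Cfun, PySem.Dict.empty, PySem.Dict.keys]
  | cons r L ih =>
    show ((Cfun (r :: L)).items.map Prod.fst).Nodup
    simp only [Cfun]
    rw [mergeB _ _ ih, dedup1_empty_items, List.map_append]
    simp only [List.map_map]
    have e1 : (Prod.fst ∘ fun d => ((d : Int), (1 : Int))) = id := by funext d; rfl
    have e2 : (Prod.fst ∘ fun p : Int × Int => (p.1, p.2 + 1)) = Prod.fst := by funext p; rfl
    rw [e1, e2, List.map_id, map_fst_filter_contains]
    refine List.Nodup.append (nodup_news r []) (List.Nodup.filter _ ih) ?_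
    intro x hx hx'
    have h2 := (List.mem_filter.mp hx').2
    rw [PySem.Dict.contains_eq_decide_mem_keys, dedup1_keys] at h2
    simp only [Bool.not_eq_true', decide_eq_false_iff_not] at h2
    exact h2 hx

theorem Cfun_cons_items (r : List Int) (L : List (List Int)) :
    (Cfun (r :: L)).items
      = (news [] r).map (fun d => (d, (1 : Int)))
        ++ ((Cfun L).items.filter (fun p => decide (p.1 ∉ r))).map (fun p => (p.1, p.2 + 1)) := by
  simp only [Cfun]
  rw [mergeB _ _ (Cfun_nodup_keys L), dedup1_empty_items]
  congr 2
  apply List.filter_congr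
  intro p _
  rw [PySem.Dict.contains_eq_decide_mem_keys, dedup1_keys]
  simp [mem_news]

-- A's loop over the reversed history, generalized over the start index and the dict pair
theorem Aloop : ∀ (L : List (List Int)) (i : Int) (lp dc : PySem.Dict Int Int), dc.keys = lp.keys →
    ((PySem.List.enumerate L i).foldl
      (fun (st : PySem.Dict Int Int × PySem.Dict Int Int) p =>
        p.2.foldl (fun st d =>
          if st.1.contains d then st
          else (st.1.insert d p.1, st.2.insert d (p.1 + 1))) st) (lp, dc)).2.items
    = dc.items ++ ((Cfun L).items.filter (fun p => !(lp.contains p.1))).map (fun p => (p.1, p.2 + i)) := by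
  intro L
  induction L with
  | nil => intro i lp dc _; simp [PySem.List.enumerate_nil, Cfun, PySem.Dict.empty]
  | cons r L ih =>
    intro i lp dc hk
    rw [PySem.List.enumerate_cons, List.foldl_cons]
    simp only []
    obtain ⟨h1, h2⟩ := innerA r i lp dc hk
    set st' := r.foldl (fun st d =>
      if st.1.contains d then st
      else (st.1.insert d i, st.2.insert d (i + 1))) ((lp, dc) : PySem.Dict Int Int × PySem.Dict Int Int) with hst'
    have hk2 : st'.2.keys = st'.1.keys := by
      show st'.2.items.map Prod.fst = _
      rw [h2, h1, List.map_append, List.map_map]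
      have hdk : dc.items.map Prod.fst = lp.keys := hk
      rw [hdk]
      have e : (Prod.fst ∘ fun d => ((d : Int), i + 1)) = id := by funext d; rfl
      rw [e, List.map_id]
    have hih := ih (i + 1) st'.1 st'.2 hk2
    rw [show ((st'.1, st'.2) : PySem.Dict Int Int × PySem.Dict Int Int) = st' from rfl] at hih
    rw [hih, h2]
    -- now rewrite the RHS through the one-step expansion of Cfun
    rw [Cfun_cons_items, List.filter_append, List.map_append, ← List.append_assoc]
    congr 1
    · -- the new digits of r
      congr 1
      have hswap : ((news [] r).map (fun d => (d, (1 : Int)))).filter (fun p => !(lp.contains p.1))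
          = ((news [] r).filter (fun d => !(lp.contains d))).map (fun d => (d, (1 : Int))) := by
        induction news [] r with
        | nil => rfl
        | cons d l ihl =>
          simp only [List.map_cons, List.filter_cons]
          by_cases hcd : (!(lp.contains d)) = true
          · simp only [hcd, if_pos trivial, List.map_cons, ihl]
          · rw [if_neg (by simp_all), if_neg (by simp_all)]
            exact ihl
      rw [hswap, List.map_map]
      have hfe : (news [] r).filter (fun d => !(lp.contains d))
          = (news [] r).filter (fun d => decide (d ∉ lp.keys)) := by
        apply List.filter_congr
        intro x _
        rw [PySem.Dict.contains_eq_decide_mem_keys]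
        simp
      rw [hfe, ← news_eq_filter]
      apply List.map_congr_left
      intro d _
      show (d, i + 1) = ((fun p : Int × Int => (p.1, p.2 + i)) ∘ fun d => (d, (1 : Int))) d
      show (d, i + 1) = (d, 1 + i)
      rw [Int.add_comm]
    · -- the aged older digits
      have hswap : (((Cfun L).items.filter (fun p => decide (p.1 ∉ r))).map
            (fun p => (p.1, p.2 + 1))).filter (fun p => !(lp.contains p.1))
          = (((Cfun L).items.filter (fun p => decide (p.1 ∉ r))).filter
            (fun p => !(lp.contains p.1))).map (fun p => (p.1, p.2 + 1)) := by
        induction (Cfun L).items.filter (fun p => decide (p.1 ∉ r)) with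
        | nil => rfl
        | cons p l ihl =>
          simp only [List.map_cons, List.filter_cons]
          by_cases hcd : (!(lp.contains p.1)) = true
          · simp only [hcd, if_pos trivial, List.map_cons, ihl]
          · rw [if_neg (by simp_all), if_neg (by simp_all)]
            exact ihl
      rw [hswap, List.map_map, List.filter_filter]
      have hfe : (Cfun L).items.filter (fun p => !(st'.1.contains p.1))
          = (Cfun L).items.filter (fun p => (!(lp.contains p.1)) && decide (p.1 ∉ r)) := by
        apply List.filter_congr
        intro p _
        rw [PySem.Dict.contains_eq_decide_mem_keys, h1, PySem.Dict.contains_eq_decide_mem_keys]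
        by_cases ha : p.1 ∈ lp.keys <;> by_cases hb : p.1 ∈ r <;>
          simp [ha, hb, mem_news]
      rw [hfe]
      apply List.map_congr_left
      intro p _
      show (p.1, p.2 + (i + 1)) = (p.1, p.2 + 1 + i)
      rw [Int.add_assoc, Int.add_comm 1 i]

theorem B_eq_Cfun : ∀ (h : List (List Int)),
    h.foldl
      (fun (delay_count : PySem.Dict Int Int) result =>
        (delay_count.items.foldl
          (fun n p => if n.contains p.1 then n else n.insert p.1 (p.2 + 1))
          (result.foldl (fun (n : PySem.Dict Int Int) d => n.setdefault d 1) PySem.Dict.empty)))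
      PySem.Dict.empty = Cfun h.reverse := by
  intro h
  induction h using List.reverseRecOn with
  | nil => rfl
  | append_singleton h r ih =>
    rw [List.foldl_append, List.foldl_cons, List.foldl_nil, ih, List.reverse_append]
    rfl

-- ===== VERDICT (by name: the statement is the Claim_ definition above) =====
theorem analyze_delay_spec : Claim_equal_analyze_delay := by
  intro history _
  show analyze_delay history = analyze_delay_alt history
  unfold analyze_delay
  simp only [PySem.List.slice?_none_none_neg_one, Option.getD_some]
  rw [Aloop history.reverse 0 PySem.Dict.empty PySem.Dict.empty rfl]
  have hemp : (PySem.Dict.empty : PySem.Dict Int Int).items = [] := rfl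
  rw [hemp, List.nil_append]
  have hfe : (Cfun history.reverse).items.filter
      (fun p => !((PySem.Dict.empty : PySem.Dict Int Int).contains p.1))
      = (Cfun history.reverse).items := by
    apply List.filter_eq_self.mpr
    intro p _
    rw [PySem.Dict.contains_empty]
    rfl
  rw [hfe]
  have hmap : (Cfun history.reverse).items.map (fun p => (p.1, p.2 + 0))
      = (Cfun history.reverse).items := by
    apply List.map_congr_left ?_ |>.trans (List.map_id _)
    intro p _
    show (p.1, p.2 + 0) = p
    rw [Int.add_zero]
  rw [hmap]
  exact (congrArg PySem.Dict.items (B_eq_Cfun history)).symm
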